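-- pv_equiv track=rewrite | github.com/ChhaySereyVath/COSC-111-101-Spring-2022 | Ex 3.py | remove_all_after
-- ===== SOURCE A (Python) =====
-- def remove_all_after(array,index):
--     new_array=[]
--     n=0
--     for i in array:
--         if i < index:
--             new_array.append(array[n])
--             n+=1
--         elif i == index:
--             i=index
--             new_array.append(array[n])
--             break
--         else:
--             break
--     return new_array
-- ===== SOURCE B (Python) =====
-- def remove_all_after(array, index):
--     j = next((k for k, v in enumerate(array) if v >= index), len(array))
--     end = j + 1 if j < len(array) and array[j] == index else j
--     return list(array[:end])
-- ===== Notes on version B (the rewrite author's own statement) =====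
-- stated objective: alternative
-- what changed: Replaces A's append-per-element loop with counter n by a find-the-first-element->=index scan followed by a single slice of the prefix.
import Mathlib
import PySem

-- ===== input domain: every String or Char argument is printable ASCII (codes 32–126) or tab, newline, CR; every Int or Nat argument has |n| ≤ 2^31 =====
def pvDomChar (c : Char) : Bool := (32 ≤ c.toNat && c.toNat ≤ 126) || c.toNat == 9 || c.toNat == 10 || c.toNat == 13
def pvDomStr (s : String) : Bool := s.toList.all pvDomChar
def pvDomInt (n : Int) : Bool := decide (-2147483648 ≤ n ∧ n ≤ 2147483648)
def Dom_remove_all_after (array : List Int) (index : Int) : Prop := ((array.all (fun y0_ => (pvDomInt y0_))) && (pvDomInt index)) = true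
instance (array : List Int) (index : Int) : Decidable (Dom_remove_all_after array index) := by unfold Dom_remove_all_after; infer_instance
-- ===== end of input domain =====

-- B replaces A's append-per-element loop (with its running counter n) by a
-- find-first-element-≥-index scan followed by one slice; same O(n) cost.

-- ===== PORT A =====
-- A's for-loop with early break: structural recursion over the remaining list,
-- carrying new_array and n.  Python's array[n] is in range on every reachable
-- call (n counts processed elements), so pyGetD's default is never used.
def pvGoA (index : Int) (orig : List Int) : List Int → List Int → Int → List Int
  | [], new_array, _ => new_array
  | i :: rest, new_array, n =>
    if i < index then
      pvGoA index orig rest (new_array ++ [PySem.List.pyGetD orig n 0]) (n + 1)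
    else if i = index then
      new_array ++ [PySem.List.pyGetD orig n 0]      -- append then break
    else
      new_array                                      -- break

def remove_all_after (array : List Int) (index : Int) : List Int :=
  pvGoA index array array [] 0

-- ===== PORT B =====
-- next((k for k, v in enumerate(array) if v >= index), len(array))
def pvFindGE (index : Int) : List Int → Nat
  | [] => 0
  | v :: rest => if index ≤ v then 0 else 1 + pvFindGE index rest

def remove_all_after_alt (array : List Int) (index : Int) : List Int :=
  let j := pvFindGE index array
  let e : Nat :=
    if h : j < array.length then (if array[j] = index then j + 1 else j) else j
  PySem.List.slice array none (some (e : Int))       -- list(array[:end])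

-- ===== PRECONDITION & SPEC =====
def Spec_remove_all_after (array : List Int) (index : Int) (out : List Int) : Prop := out = remove_all_after_alt array index
instance (array : List Int) (index : Int) (out : List Int) : Decidable (Spec_remove_all_after array index out) := by unfold Spec_remove_all_after; infer_instance

-- ===== CLAIM (what is proved, stated in full; the proofs are below) =====
def Claim_equal_remove_all_after : Prop := ∀ (array : List Int) (index : Int), Dom_remove_all_after array index → Spec_remove_all_after array index (remove_all_after array index)

-- ===== LEMMAS AND PROOFS =====

-- common characterisation: the prefix of elements < index, plus the first
-- element itself when it equals index
def pvCore (index : Int) : List Int → List Int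
  | [] => []
  | i :: rest => if i < index then i :: pvCore index rest
                 else if i = index then [i] else []

lemma alt_eq_core (array : List Int) (index : Int) :
    remove_all_after_alt array index = pvCore index array := by
  induction array with
  | nil =>
    simp only [remove_all_after_alt]
    rw [PySem.List.slice_to_natCast]
    simp [pvCore]
  | cons i rest ih =>
    simp only [remove_all_after_alt]
    rw [PySem.List.slice_to_natCast]
    by_cases hge : index ≤ i
    · have hj0 : pvFindGE index (i :: rest) = 0 := by simp [pvFindGE, hge]
      rw [hj0]
      have h0 : (0 : Nat) < (i :: rest).length := by simp
      rw [dif_pos h0]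
      by_cases heq : i = index
      · simp [pvCore, heq]
      · have hg0 : (i :: rest)[0]'h0 = i := rfl
        rw [hg0, if_neg heq]
        simp [pvCore, heq, not_lt.mpr hge]
    · have hlt : i < index := lt_of_not_ge hge
      have hj : pvFindGE index (i :: rest) = 1 + pvFindGE index rest := by
        simp [pvFindGE, hge]
      rw [hj]
      have hE : (if h : 1 + pvFindGE index rest < (i :: rest).length then
            (if (i :: rest)[1 + pvFindGE index rest]'h = index then
              1 + pvFindGE index rest + 1 else 1 + pvFindGE index rest)
          else 1 + pvFindGE index rest)
          = (if h : pvFindGE index rest < rest.length then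
              (if rest[pvFindGE index rest]'h = index then
                pvFindGE index rest + 1 else pvFindGE index rest)
            else pvFindGE index rest) + 1 := by
        by_cases hjl : pvFindGE index rest < rest.length
        · have h1 : 1 + pvFindGE index rest < (i :: rest).length := by
            simp only [List.length_cons]; omega
          have hgj : (i :: rest)[1 + pvFindGE index rest]'h1
              = rest[pvFindGE index rest]'hjl := by
            simp [Nat.add_comm 1 (pvFindGE index rest)]
          rw [dif_pos h1, dif_pos hjl, hgj]
          split_ifs <;> omega
        · have h1 : ¬ (1 + pvFindGE index rest < (i :: rest).length) := by
            simp only [List.length_cons]; omega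
          rw [dif_neg h1, dif_neg hjl]
          omega
      rw [hE, List.take_succ_cons]
      have halt : remove_all_after_alt rest index
          = List.take (if h : pvFindGE index rest < rest.length then
              (if rest[pvFindGE index rest]'h = index then
                pvFindGE index rest + 1 else pvFindGE index rest)
            else pvFindGE index rest) rest := by
        simp only [remove_all_after_alt]
        rw [PySem.List.slice_to_natCast]
      rw [← halt, ih]
      simp [pvCore, hlt]

lemma goA_eq (index : Int) (pre rest acc : List Int) :
    pvGoA index (pre ++ rest) rest acc (pre.length : Int)
      = acc ++ pvCore index rest := by
  induction rest generalizing pre acc with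
  | nil => simp [pvGoA, pvCore]
  | cons i t ih =>
    have hget : PySem.List.pyGetD (pre ++ i :: t) (pre.length : Int) 0 = i := by
      rw [PySem.List.pyGetD_natCast]
      simp [List.getD]
    by_cases hlt : i < index
    · have unf : pvGoA index (pre ++ i :: t) (i :: t) acc (pre.length : Int)
          = pvGoA index (pre ++ i :: t) t (acc ++ [i]) ((pre.length : Int) + 1) := by
        simp only [pvGoA, hget, if_pos hlt]
      have e1 : pre ++ i :: t = (pre ++ [i]) ++ t := by simp
      have e2 : (pre.length : Int) + 1 = ((pre ++ [i]).length : Int) := by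
        push_cast [List.length_append, List.length_cons, List.length_nil]
        omega
      rw [unf, e1, e2, ih (pre ++ [i]) (acc ++ [i])]
      simp [pvCore, hlt]
    · by_cases heq : i = index
      · simp [pvGoA, pvCore, heq]
      · simp [pvGoA, pvCore, hlt, heq]

-- ===== VERDICT (by name: the statement is the Claim_ definition above) =====
theorem remove_all_after_spec : Claim_equal_remove_all_after := by
  intro array index _
  unfold Spec_remove_all_after
  rw [alt_eq_core]
  have := goA_eq index [] array []
  simpa [remove_all_after] using this
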